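-- pv_equiv track=rewrite | github.com/mbarakaja/codility-lessons | challenges/digital_gold.py | sum_lines
-- ===== SOURCE A (Python) =====
-- def sum_lines(size, lines, max_gold):
--     """Sum how many golds are over an axis."""
--
--     divisions = 0 # divisions
--     golds = 0 # Golds
--
--     for i in range(size):
--         golds += lines.get(i, 0)
--
--         if golds > max_gold:
--             break
--
--         if golds == max_gold:
--             divisions += 1
--
--     return divisions
-- ===== SOURCE B (Python) =====
-- def sum_lines(size, lines, max_gold):
--     """Sum how many golds are over an axis."""
--     # The running total only changes at indices that are keys of `lines`;
--     # walk the sorted keys and count whole constant runs at once.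
--     if size <= 0:
--         return 0
--     divisions = 0
--     golds = 0
--     prev = 0  # first index not yet examined
--     for k in sorted(k for k in lines if 0 <= k < size):
--         if prev < k:
--             if golds > max_gold:
--                 return divisions
--             if golds == max_gold:
--                 divisions += k - prev
--         golds += lines[k]
--         if golds > max_gold:
--             return divisions
--         if golds == max_gold:
--             divisions += 1
--         prev = k + 1
--     if prev < size:
--         if golds > max_gold:
--             return divisions
--         if golds == max_gold:
--             divisions += size - prev
--     return divisions
-- ===== Notes on version B (the rewrite author's own statement) =====
-- stated objective: alternative
-- what changed: Instead of scanning every index 0..size-1 and looking each one up in the dict, B sorts the dict's in-range keys and processes each constant run of the prefix sum in O(1), counting whole runs at once.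
import Mathlib
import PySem

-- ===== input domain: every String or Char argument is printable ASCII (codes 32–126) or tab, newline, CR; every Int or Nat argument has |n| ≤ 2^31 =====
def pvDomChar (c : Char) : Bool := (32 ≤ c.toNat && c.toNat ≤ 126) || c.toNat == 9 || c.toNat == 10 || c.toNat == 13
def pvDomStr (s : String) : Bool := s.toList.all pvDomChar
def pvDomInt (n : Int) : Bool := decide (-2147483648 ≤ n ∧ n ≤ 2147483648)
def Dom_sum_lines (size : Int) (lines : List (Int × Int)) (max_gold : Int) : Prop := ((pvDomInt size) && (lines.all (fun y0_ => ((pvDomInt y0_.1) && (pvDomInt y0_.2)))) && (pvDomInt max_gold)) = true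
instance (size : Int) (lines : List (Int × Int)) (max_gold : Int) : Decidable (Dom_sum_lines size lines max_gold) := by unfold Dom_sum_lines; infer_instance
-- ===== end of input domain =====

-- B replaces A's scan of every index in range(size) by a walk over the sorted dict
-- keys, counting each constant run of the prefix sum in one step (alternative algorithm).

-- ===== PORT A =====
-- the for-loop of A over range(size): state (golds, divisions); `break` returns divisions
def sumLinesLoop (d : PySem.Dict Int Int) (max_gold : Int) : List Int → Int → Int → Int
  | [], _, divisions => divisions
  | i :: rest, golds, divisions =>
    let g := golds + d.getD i 0          -- golds += lines.get(i, 0)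
    if g > max_gold then divisions       -- break
    else if g = max_gold then sumLinesLoop d max_gold rest g (divisions + 1)
    else sumLinesLoop d max_gold rest g divisions

def sum_lines (size : Int) (lines : List (Int × Int)) (max_gold : Int) : Int :=
  sumLinesLoop (PySem.Dict.mk lines) max_gold (PySem.List.pyRange 0 size 1) 0 0

-- ===== PORT B =====
-- B's for-loop over the sorted keys: state (golds, divisions, prev); `return` yields divisions
def sumAltLoop (d : PySem.Dict Int Int) (max_gold size : Int) : List Int → Int → Int → Int → Int
  | [], golds, divisions, prev =>        -- after the loop: the tail run [prev, size)
    if prev < size then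
      if golds > max_gold then divisions
      else if golds = max_gold then divisions + (size - prev)
      else divisions
    else divisions
  | k :: rest, golds, divisions, prev =>
    if prev < k ∧ golds > max_gold then divisions                    -- return divisions
    else
      let divisions := if prev < k ∧ golds = max_gold then divisions + (k - prev) else divisions
      let golds := golds + d.getD k 0    -- golds += lines[k]  (k is a key, so exact)
      if golds > max_gold then divisions                             -- return divisions
      else
        let divisions := if golds = max_gold then divisions + 1 else divisions
        sumAltLoop d max_gold size rest golds divisions (k + 1)

def sum_lines_alt (size : Int) (lines : List (Int × Int)) (max_gold : Int) : Int :=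
  if size ≤ 0 then 0
  else
    -- sorted(k for k in lines if 0 <= k < size): dict iteration = distinct keys in order
    let keys := PySem.List.sorted
      ((PySem.Set.ofList (lines.map Prod.fst)).filter (fun k => decide (0 ≤ k) && decide (k < size)))
      (fun x => x) false
    sumAltLoop (PySem.Dict.mk lines) max_gold size keys 0 0 0

-- ===== PRECONDITION & SPEC =====
def Spec_sum_lines (size : Int) (lines : List (Int × Int)) (max_gold : Int) (out : Int) : Prop := out = sum_lines_alt size lines max_gold
instance (size : Int) (lines : List (Int × Int)) (max_gold : Int) (out : Int) : Decidable (Spec_sum_lines size lines max_gold out) := by unfold Spec_sum_lines; infer_instance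

-- ===== CLAIM (what is proved, stated in full; the proofs are below) =====
def Claim_equal_sum_lines : Prop := ∀ (size : Int) (lines : List (Int × Int)) (max_gold : Int), Dom_sum_lines size lines max_gold → Spec_sum_lines size lines max_gold (sum_lines size lines max_gold)

-- ===== LEMMAS AND PROOFS =====

-- Skipping a key-free stretch [prev, prev+n): golds is unchanged, divisions grows by n iff golds = max_gold.
theorem sumLinesLoop_skip (d : PySem.Dict Int Int) (mg : Int) :
    ∀ (n : Nat) (prev size golds div : Int), golds ≤ mg → prev + n ≤ size →
    (∀ i : Int, prev ≤ i → i < prev + n → d.getD i 0 = 0) →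
    sumLinesLoop d mg (PySem.List.pyRange prev size 1) golds div =
      sumLinesLoop d mg (PySem.List.pyRange (prev + n) size 1) golds
        (if golds = mg then div + n else div) := by
  intro n
  induction n with
  | zero => intro prev size golds div _ _ _; simp
  | succ n ih =>
    intro prev size golds div hle hsz hz
    have hps : prev < size := by omega
    rw [PySem.List.pyRange_one_cons hps]
    have h0 : d.getD prev 0 = 0 := hz prev (le_refl _) (by omega)
    simp only [sumLinesLoop, h0, add_zero]
    have hng : ¬ golds > mg := by omega
    rw [if_neg hng]
    by_cases he : golds = mg
    · rw [if_pos he]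
      have := ih (prev + 1) size golds (div + 1) hle (by omega)
        (fun i h1 h2 => hz i (by omega) (by omega))
      rw [this, if_pos he]
      have e1 : prev + 1 + (n : Int) = prev + ((n : Nat) + 1 : Nat) := by push_cast; ring
      have e2 : div + 1 + (n : Int) = div + ((n : Nat) + 1 : Nat) := by push_cast; ring
      rw [e1, e2, if_pos he]
    · rw [if_neg he]
      have := ih (prev + 1) size golds div hle (by omega)
        (fun i h1 h2 => hz i (by omega) (by omega))
      rw [this, if_neg he]
      have e1 : prev + 1 + (n : Int) = prev + ((n : Nat) + 1 : Nat) := by push_cast; ring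
      rw [e1, if_neg he]

-- Main invariant: from any loop state, A's remaining scan over [prev, size) equals B's walk over
-- the remaining sorted keys kl (all in [prev, size); getD vanishes off kl).
theorem main_inv (d : PySem.Dict Int Int) (mg size : Int) :
    ∀ (kl : List Int) (golds div prev : Int),
    kl.Pairwise (· < ·) →
    (∀ k ∈ kl, prev ≤ k ∧ k < size) →
    (∀ i : Int, prev ≤ i → i < size → i ∉ kl → d.getD i 0 = 0) →
    prev ≤ size →
    sumLinesLoop d mg (PySem.List.pyRange prev size 1) golds div =
      sumAltLoop d mg size kl golds div prev := by
  intro kl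
  induction kl with
  | nil =>
    intro golds div prev _ _ hz hps
    by_cases hlt : prev < size
    · by_cases hg : golds > mg
      · rw [PySem.List.pyRange_one_cons hlt]
        have h0 : d.getD prev 0 = 0 := hz prev (le_refl _) hlt (by simp)
        simp only [sumLinesLoop, h0, add_zero, if_pos hg]
        simp [sumAltLoop, hlt, hg]
      · have hle : golds ≤ mg := by omega
        have hn : prev + ((size - prev).toNat : Int) = size := by omega
        have := sumLinesLoop_skip d mg (size - prev).toNat prev size golds div hle
          (by omega) (fun i h1 h2 => hz i h1 (by omega) (by simp))
        rw [this, hn, PySem.List.pyRange_one_eq_nil (le_refl _)]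
        by_cases he : golds = mg
        · simp only [sumLinesLoop, sumAltLoop, if_pos he, if_pos hlt, if_neg hg]
          have : ((size - prev).toNat : Int) = size - prev := by omega
          rw [this]
        · simp [sumLinesLoop, sumAltLoop, he, hlt, hg]
    · have hpe : prev = size := by omega
      rw [PySem.List.pyRange_one_eq_nil (by omega)]
      simp [sumLinesLoop, sumAltLoop, hlt]
  | cons k rest ih =>
    intro golds div prev hpw hbd hz hps
    have hkb := hbd k (by simp)
    have hrest_gt : ∀ k' ∈ rest, k < k' := (List.pairwise_cons.mp hpw).1
    -- the key step at index k, from any divisions value dv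
    have keystep : ∀ dv : Int,
        sumLinesLoop d mg (PySem.List.pyRange k size 1) golds dv =
          sumAltLoop d mg size (k :: rest) golds dv k := by
      intro dv
      rw [PySem.List.pyRange_one_cons hkb.2]
      have hnk : ¬ (k < k ∧ golds > mg) := by omega
      simp only [sumLinesLoop, sumAltLoop, if_neg hnk]
      have hnk2 : ¬ (k < k ∧ golds = mg) := by omega
      rw [if_neg hnk2]
      set g := golds + d.getD k 0 with hg
      by_cases hgt : g > mg
      · rw [if_pos hgt, if_pos hgt]
      · rw [if_neg hgt, if_neg hgt]
        by_cases he : g = mg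
        · rw [if_pos he, if_pos he]
          exact ih g (dv + 1) (k + 1) (List.Pairwise.sublist (by simp) hpw)
            (fun k' hk' => ⟨by have := hrest_gt k' hk'; omega, (hbd k' (by simp [hk'])).2⟩)
            (fun i h1 h2 hni => hz i (by omega) h2 (by simp only [List.mem_cons, not_or]; exact ⟨by omega, hni⟩))
            (by omega)
        · rw [if_neg he, if_neg he]
          exact ih g dv (k + 1) (List.Pairwise.sublist (by simp) hpw)
            (fun k' hk' => ⟨by have := hrest_gt k' hk'; omega, (hbd k' (by simp [hk'])).2⟩)
            (fun i h1 h2 hni => hz i (by omega) h2 (by simp only [List.mem_cons, not_or]; exact ⟨by omega, hni⟩))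
            (by omega)
    by_cases hpk : prev < k
    · have hnotin : ∀ i : Int, prev ≤ i → i < k → i ∉ k :: rest := by
        intro i h1 h2
        simp only [List.mem_cons, not_or]
        exact ⟨by omega, fun hmem => by have := hrest_gt i hmem; omega⟩
      by_cases hg : golds > mg
      · rw [PySem.List.pyRange_one_cons (by omega)]
        have h0 : d.getD prev 0 = 0 :=
          hz prev (le_refl _) (by omega) (hnotin prev (le_refl _) hpk)
        simp only [sumLinesLoop, h0, add_zero, if_pos hg]
        simp [sumAltLoop, hpk, hg]
      · have hle : golds ≤ mg := by omega
        have hn : prev + ((k - prev).toNat : Int) = k := by omega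
        have hskip := sumLinesLoop_skip d mg (k - prev).toNat prev size golds div hle
          (by omega)
          (fun i h1 h2 => hz i h1 (by omega) (hnotin i h1 (by omega)))
        -- fold B's interval bookkeeping for [prev, k) into the divisions argument
        have hnk : ¬ (prev < k ∧ golds > mg) := by omega
        have hB : sumAltLoop d mg size (k :: rest) golds div prev =
            sumAltLoop d mg size (k :: rest) golds
              (if prev < k ∧ golds = mg then div + (k - prev) else div) k := by
          simp only [sumAltLoop, if_neg hnk, if_neg (show ¬ (k < k ∧ golds > mg) by omega),
            if_neg (show ¬ (k < k ∧ golds = mg) by omega)]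
        rw [hskip, hn, keystep, hB]
        by_cases he : golds = mg
        · rw [if_pos he, if_pos ⟨hpk, he⟩, show ((k - prev).toNat : Int) = k - prev by omega]
        · rw [if_neg he, if_neg (by tauto)]
    · have hpe : prev = k := by omega
      rw [hpe, keystep]

-- ===== VERDICT (by name: the statement is the Claim_ definition above) =====
theorem sum_lines_spec : Claim_equal_sum_lines := by
  intro size lines max_gold _
  unfold Spec_sum_lines sum_lines sum_lines_alt
  by_cases hsz : size ≤ 0
  · rw [if_pos hsz, PySem.List.pyRange_one_eq_nil hsz]
    rfl
  · rw [if_neg hsz]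
    set d := PySem.Dict.mk lines with hd
    set keys := PySem.List.sorted
      ((PySem.Set.ofList (lines.map Prod.fst)).filter (fun k => decide (0 ≤ k) && decide (k < size)))
      (fun x => x) false with hkeys
    have hmem : ∀ k : Int, k ∈ keys ↔ (k ∈ lines.map Prod.fst ∧ 0 ≤ k ∧ k < size) := by
      intro k
      rw [hkeys, PySem.List.mem_sorted, List.mem_filter, PySem.Set.mem_ofList]
      simp
    have hnd : keys.Nodup := by
      have h1 : ((PySem.Set.ofList (lines.map Prod.fst)).filter
          (fun k => decide (0 ≤ k) && decide (k < size))).Nodup :=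
        (PySem.Set.nodup_ofList _).filter _
      exact ((PySem.List.sorted_perm _ _ _).nodup_iff).mpr h1
    have hpw : keys.Pairwise (· < ·) := by
      have hle := PySem.List.sorted_pairwise
        ((PySem.Set.ofList (lines.map Prod.fst)).filter (fun k => decide (0 ≤ k) && decide (k < size)))
        (fun x => x)
      exact (hle.and hnd).imp (fun h => lt_of_le_of_ne h.1 h.2)
    apply main_inv d max_gold size keys 0 0 0 hpw
      (fun k hk => by have := (hmem k).mp hk; exact ⟨this.2.1, this.2.2⟩)
      (fun i h1 h2 hni => ?_) (by omega)
    have hnotkey : i ∉ lines.map Prod.fst := by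
      intro hmemi
      exact hni ((hmem i).mpr ⟨hmemi, h1, h2⟩)
    apply PySem.Dict.getD_of_not_contains
    rw [PySem.Dict.contains_eq_decide_mem_keys]
    simp only [hd, PySem.Dict.keys_mk]
    simpa using hnotkey
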